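-- pv_equiv track=rewrite | github.com/ctorres803/-test_dev_back_datamart | exercises_1_2_7.py | mapeo_con_busqueda_binaria_paralelo
-- ===== SOURCE A (Python) =====
-- from concurrent.futures import ThreadPoolExecutor, as_completed
--
-- def busqueda_binaria(lista, objetivo, inicio, fin):
--     # Caso base: si la parte de la lista no es válida
--     if inicio > fin:
--         return False
--
--     # Encuentra el punto medio de la lista
--     medio = (inicio + fin) // 2
--
--     # Caso base: si el elemento medio es el objetivo
--     if lista[medio] == objetivo:
--         return True
--
--     # Si el objetivo es menor que el elemento medio, buscar en la mitad izquierda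
--     elif lista[medio] > objetivo:
--         return busqueda_binaria(lista, objetivo, inicio, medio - 1)
--
--     # Si el objetivo es mayor que el elemento medio, buscar en la mitad derecha
--     else:
--         return busqueda_binaria(lista, objetivo, medio + 1, fin)
--
-- def mapeo_con_busqueda_binaria_paralelo(lista1, lista2, max_workers):
--     def tarea_busqueda(elemento):
--         return busqueda_binaria(lista1, elemento, 0, len(lista1) - 1)
--
--     resultados = [False] * len(lista2)
--
--     with ThreadPoolExecutor(max_workers=max_workers) as executor:
--         futuros = {executor.submit(tarea_busqueda, elemento): idx for idx, elemento in enumerate(lista2)}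
--
--         for futuro in as_completed(futuros):
--             idx = futuros[futuro]
--             resultados[idx] = futuro.result()
--
--     return resultados
-- ===== SOURCE B (Python) =====
-- def contiene(lista, x):
--     # iterative search on shrinking sub-lists: no index arithmetic, the current
--     # candidate segment IS the list; midpoint element of a segment of length L
--     # is seg[(L-1)//2], which names the same element as the original's
--     # (inicio+fin)//2, so the comparison path is identical even if lista is
--     # unsorted.
--     seg = lista
--     while seg:
--         m = (len(seg) - 1) // 2
--         v = seg[m]
--         if v == x:
--             return True
--         if v > x:
--             seg = seg[:m]
--         else:
--             seg = seg[m + 1:]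
--     return False
--
-- def mapeo_con_busqueda_binaria_paralelo(lista1, lista2, max_workers):
--     # the thread pool only parallelises pure lookups written back by index,
--     # so a sequential pass produces the same list; max_workers is unused.
--     return [contiene(lista1, x) for x in lista2]
-- ===== Notes on version B (the rewrite author's own statement) =====
-- stated objective: alternative
-- what changed: The index-pair recursive binary search becomes an iterative loop over shrinking list slices (the segment itself is the state, no index arithmetic), and the ThreadPoolExecutor/futures-dict machinery is replaced by a plain sequential list comprehension; it trades index bookkeeping for slice copies.
import Mathlib
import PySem

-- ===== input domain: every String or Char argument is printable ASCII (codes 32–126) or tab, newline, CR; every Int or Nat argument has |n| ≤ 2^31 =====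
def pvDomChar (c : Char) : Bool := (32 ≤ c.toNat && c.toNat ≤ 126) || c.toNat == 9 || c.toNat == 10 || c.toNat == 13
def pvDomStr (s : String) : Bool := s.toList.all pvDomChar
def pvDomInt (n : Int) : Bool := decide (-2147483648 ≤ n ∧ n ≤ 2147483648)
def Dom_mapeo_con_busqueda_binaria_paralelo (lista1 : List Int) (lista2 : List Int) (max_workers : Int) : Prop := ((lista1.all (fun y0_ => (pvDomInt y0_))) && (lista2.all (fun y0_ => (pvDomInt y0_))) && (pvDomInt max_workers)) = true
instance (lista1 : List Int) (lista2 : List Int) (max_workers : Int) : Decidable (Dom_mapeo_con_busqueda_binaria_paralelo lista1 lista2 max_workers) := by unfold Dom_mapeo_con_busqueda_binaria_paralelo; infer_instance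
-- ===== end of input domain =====

-- B replaces the index-pair recursive binary search by an iterative loop on shrinking list
-- slices and the thread-pool / futures-dict plumbing by a plain sequential list
-- comprehension (the lookups are pure and written back by index, so the list is the same).

-- ===== PORT A =====
-- recursive binary search, exactly A's branch order and midpoint formula
def busqueda_binaria (lista : List Int) (objetivo : Int) (inicio fin : Int) : Bool :=
  if h : inicio > fin then false
  else
    let medio := PySem.Int.floordiv (inicio + fin) 2
    -- lista[medio]: Python raises IndexError out of range; pyGet? returns none there
    match PySem.List.pyGet? lista medio with
    | none => false
    | some v =>
      if v == objetivo then true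
      else if v > objetivo then busqueda_binaria lista objetivo inicio (medio - 1)
      else busqueda_binaria lista objetivo (medio + 1) fin
termination_by (fin - inicio + 1).toNat
decreasing_by
  all_goals
    have hb := PySem.Int.floordiv_two_mid_bounds (lo := inicio) (hi := fin) (by omega)
    omega

-- the ThreadPoolExecutor only runs the pure task per element; resultados[idx] is set
-- from the future submitted for index idx, so the final list does not depend on the
-- as_completed completion order: we iterate the futures in submission order.
def mapeo_con_busqueda_binaria_paralelo (lista1 : List Int) (lista2 : List Int) (max_workers : Int) : List Bool :=
  let tarea_busqueda := fun (elemento : Int) =>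
    busqueda_binaria lista1 elemento 0 ((lista1.length : Int) - 1)
  let resultados := List.replicate lista2.length false
  let futuros := (PySem.List.enumerate lista2 0).map (fun p => (tarea_busqueda p.2, p.1))
  futuros.foldl (fun res p => res.set p.2.toNat p.1) resultados  -- idx is always ≥ 0

-- ===== PORT B =====
-- Source B's while-loop over the shrinking segment. The loop state is the segment itself;
-- the fuel argument only makes the recursion structural (lista.length iterations always
-- suffice, since the segment strictly shrinks) — it changes nothing else.
-- m = (len(seg)-1)//2 on a nonempty seg is the Nat division ys.length / 2; seg[m] is
-- always in range (proof inline); seg[:m] = seg.take m and seg[m+1:] = seg.drop (m+1)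
-- are exact for these nonnegative in-range bounds (PySem.List.slice_to_natCast /
-- slice_from_natCast).
-- seg[(len(seg)-1)//2] is always in range on a nonempty segment
theorem pv_mid_lt (y : Int) (ys : List Int) : ys.length / 2 < (y :: ys).length := by
  simp only [List.length_cons]
  have := Nat.div_le_self ys.length 2
  omega

def contiene_go (x : Int) (fuel : Nat) (seg : List Int) : Bool :=
  match fuel, seg with
  | 0, _ => false          -- never reached: fuel starts at lista.length
  | _ + 1, [] => false
  | fuel + 1, y :: ys =>
    let m := ys.length / 2
    let v := (y :: ys)[m]'(pv_mid_lt y ys)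
    if v == x then true
    else if v > x then contiene_go x fuel ((y :: ys).take m)
    else contiene_go x fuel ((y :: ys).drop (m + 1))

def contiene (x : Int) (lista : List Int) : Bool := contiene_go x lista.length lista

def mapeo_con_busqueda_binaria_paralelo_alt (lista1 : List Int) (lista2 : List Int) (max_workers : Int) : List Bool :=
  lista2.map (fun x => contiene x lista1)

-- ===== PRECONDITION & SPEC =====
-- ThreadPoolExecutor(max_workers) raises ValueError unless max_workers > 0
def Pre_mapeo_con_busqueda_binaria_paralelo (lista1 : List Int) (lista2 : List Int) (max_workers : Int) : Prop := 1 ≤ max_workers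
instance (lista1 : List Int) (lista2 : List Int) (max_workers : Int) : Decidable (Pre_mapeo_con_busqueda_binaria_paralelo lista1 lista2 max_workers) := by unfold Pre_mapeo_con_busqueda_binaria_paralelo; infer_instance
def pvWitness_mapeo_con_busqueda_binaria_paralelo : List Int × List Int × Int := ([1, 3, 5], [3, 2, 5], 2)

def Spec_mapeo_con_busqueda_binaria_paralelo (lista1 : List Int) (lista2 : List Int) (max_workers : Int) (out : List Bool) : Prop := out = mapeo_con_busqueda_binaria_paralelo_alt lista1 lista2 max_workers
instance (lista1 : List Int) (lista2 : List Int) (max_workers : Int) (out : List Bool) : Decidable (Spec_mapeo_con_busqueda_binaria_paralelo lista1 lista2 max_workers out) := by unfold Spec_mapeo_con_busqueda_binaria_paralelo; infer_instance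

-- ===== CLAIM =====
def Claim_equal_mapeo_con_busqueda_binaria_paralelo : Prop := ∀ (lista1 : List Int) (lista2 : List Int) (max_workers : Int), Dom_mapeo_con_busqueda_binaria_paralelo lista1 lista2 max_workers → Pre_mapeo_con_busqueda_binaria_paralelo lista1 lista2 max_workers → Spec_mapeo_con_busqueda_binaria_paralelo lista1 lista2 max_workers (mapeo_con_busqueda_binaria_paralelo lista1 lista2 max_workers)

-- ===== LEMMAS AND PROOFS =====

-- one unfolding of contiene_go on a nonempty segment whose midpoint element is v
theorem contiene_go_succ_eq_of (x : Int) (seg : List Int) (v : Int) (fuel : Nat)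
    (hne : 0 < seg.length)
    (hv : ∀ (hidx : (seg.length - 1) / 2 < seg.length), seg[(seg.length - 1) / 2] = v) :
    contiene_go x (fuel + 1) seg
      = if v == x then true
        else if v > x then contiene_go x fuel (seg.take ((seg.length - 1) / 2))
        else contiene_go x fuel (seg.drop ((seg.length - 1) / 2 + 1)) := by
  match seg with
  | [] => simp at hne
  | y :: ys =>
    have hidx : ((y :: ys).length - 1) / 2 < (y :: ys).length := by
      have := Nat.div_le_self ((y :: ys).length - 1) 2
      simp only [List.length_cons] at *
      omega
    have hv' := hv hidx
    simp only [List.length_cons, Nat.add_sub_cancel] at hv' ⊢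
    rw [contiene_go]
    simp only [hv']

-- window/segment bookkeeping shared by the three nonempty cases
theorem pv_seg_facts (l : List Int) (v inicio fin : Int) (h : ¬ inicio > fin)
    (hf : fin < (l.length : Int)) (h0 : 0 ≤ inicio)
    (hget : PySem.List.pyGet? l (PySem.Int.floordiv (inicio + fin) 2) = some v) :
    (inicio ≤ PySem.Int.floordiv (inicio + fin) 2 ∧ PySem.Int.floordiv (inicio + fin) 2 ≤ fin)
    ∧ 0 < (fin + 1 - inicio).toNat
    ∧ ((l.drop inicio.toNat).take ((fin + 1 - inicio).toNat)).length = (fin + 1 - inicio).toNat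
    ∧ PySem.Int.floordiv (inicio + fin) 2 = inicio + ((((fin + 1 - inicio).toNat - 1) / 2 : Nat) : Int)
    ∧ ∀ (hidx : (((l.drop inicio.toNat).take ((fin + 1 - inicio).toNat)).length - 1) / 2
          < ((l.drop inicio.toNat).take ((fin + 1 - inicio).toNat)).length),
        ((l.drop inicio.toNat).take ((fin + 1 - inicio).toNat))[(((l.drop inicio.toNat).take ((fin + 1 - inicio).toNat)).length - 1) / 2]'hidx = v := by
  have hb := PySem.Int.floordiv_two_mid_bounds (lo := inicio) (hi := fin) (by omega)
  have hfd : PySem.Int.floordiv (inicio + fin) 2 = (inicio + fin) / 2 :=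
    PySem.Int.floordiv_eq_ediv_of_pos (by omega)
  have hlen : ((l.drop inicio.toNat).take ((fin + 1 - inicio).toNat)).length = (fin + 1 - inicio).toNat := by
    simp only [List.length_take, List.length_drop]
    omega
  refine ⟨hb, by omega, hlen, by rw [hfd]; omega, ?_⟩
  intro hidx
  have hgetl := PySem.List.pyGet?_eq_some_getElem (xs := l) (i := PySem.Int.floordiv (inicio + fin) 2) (by omega) (by omega)
  rw [hgetl] at hget
  have hx := Option.some.inj hget
  rw [List.getElem_take, List.getElem_drop, ← hx]
  congr 1
  rw [hfd] at *
  omega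

-- A's search on the index window [inicio, fin] is B's search on the corresponding segment:
-- the segment midpoint (len-1)//2 names the element at index (inicio+fin)//2.
theorem busqueda_eq_contiene_go (l : List Int) (x : Int) :
    ∀ inicio fin : Int, ∀ fuel : Nat, 0 ≤ inicio → fin < (l.length : Int) →
    (fin + 1 - inicio).toNat ≤ fuel →
    busqueda_binaria l x inicio fin
      = contiene_go x fuel ((l.drop inicio.toNat).take ((fin + 1 - inicio).toNat)) := by
  intro inicio fin
  induction inicio, fin using busqueda_binaria.induct l x with
  | case1 inicio fin h =>
      intro fuel h0 hf hfl
      rw [busqueda_binaria, dif_pos h]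
      have : (fin + 1 - inicio).toNat = 0 := by omega
      rw [this]
      cases fuel <;> simp [contiene_go]
  | case2 inicio fin h medio hget =>
      intro fuel h0 hf hfl
      exfalso
      have hb := PySem.Int.floordiv_two_mid_bounds (lo := inicio) (hi := fin) (by omega)
      rw [PySem.List.pyGet?_eq_none_iff] at hget
      exact hget (by unfold PySem.Raise.InRange; constructor <;> omega)
  | case3 inicio fin h medio v hget hv =>
      intro fuel h0 hf hfl
      obtain ⟨hb, hL, hseglen, hmid, hval⟩ := pv_seg_facts l v inicio fin h hf h0 hget
      obtain ⟨f, rfl⟩ : ∃ f, fuel = f + 1 := ⟨fuel - 1, by omega⟩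
      rw [busqueda_binaria, dif_neg h]
      simp only [medio] at hget ⊢
      rw [hget]
      rw [contiene_go_succ_eq_of x _ v f (by omega) hval]
      simp only [hv]
      simp
  | case4 inicio fin h medio v hget hv hgt ih =>
      intro fuel h0 hf hfl
      obtain ⟨hb, hL, hseglen, hmid, hval⟩ := pv_seg_facts l v inicio fin h hf h0 hget
      obtain ⟨f, rfl⟩ : ∃ f, fuel = f + 1 := ⟨fuel - 1, by omega⟩
      rw [busqueda_binaria, dif_neg h]
      simp only [medio] at hget ⊢
      rw [hget]
      rw [contiene_go_succ_eq_of x _ v f (by omega) hval]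
      simp only [hv, hgt, Bool.false_eq_true, reduceIte, if_pos]
      rw [ih f h0 (by omega) (by simp only [medio]; omega), hseglen, List.take_take]
      congr 2
      omega
  | case5 inicio fin h medio v hget hv hgt ih =>
      intro fuel h0 hf hfl
      obtain ⟨hb, hL, hseglen, hmid, hval⟩ := pv_seg_facts l v inicio fin h hf h0 hget
      obtain ⟨f, rfl⟩ : ∃ f, fuel = f + 1 := ⟨fuel - 1, by omega⟩
      rw [busqueda_binaria, dif_neg h]
      simp only [medio] at hget ⊢
      rw [hget]
      rw [contiene_go_succ_eq_of x _ v f (by omega) hval]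
      simp only [hv, hgt, Bool.false_eq_true, reduceIte]
      rw [ih f (by omega) hf (by simp only [medio]; omega), hseglen, List.drop_take, List.drop_drop]
      have e1 : (fin + 1 - (medio + 1)).toNat
          = (fin + 1 - inicio).toNat - (((fin + 1 - inicio).toNat - 1) / 2 + 1) := by
        simp only [medio]; omega
      have e2 : (medio + 1).toNat = ((fin + 1 - inicio).toNat - 1) / 2 + 1 + inicio.toNat := by
        simp only [medio]; omega
      rw [e1, e2, Nat.add_comm inicio.toNat]

-- index-addressed writes over the enumeration rebuild the map
theorem foldl_set_enumerate (f : Int → Bool) :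
    ∀ (xs : List Int) (done : List Bool),
      (((PySem.List.enumerate xs (done.length : Int)).map (fun p => (f p.2, p.1))).foldl
          (fun res p => res.set p.2.toNat p.1) (done ++ List.replicate xs.length false))
        = done ++ xs.map f := by
  intro xs
  induction xs with
  | nil => intro done; simp [PySem.List.enumerate_nil]
  | cons x xs ih =>
      intro done
      have h1 : ((done.length : Int) + 1) = ((done ++ [f x]).length : Int) := by
        simp
      have h2 : (done ++ List.replicate (x :: xs).length false).set done.length (f x)
          = (done ++ [f x]) ++ List.replicate xs.length false := by
        simp [List.replicate_succ, List.set_append_right _ _ (le_refl done.length)]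
      simp only [PySem.List.enumerate_cons, List.map_cons, List.foldl_cons, Int.toNat_natCast, h1]
      rw [h2, ih (done ++ [f x])]
      simp

-- ===== VERDICT =====
theorem mapeo_con_busqueda_binaria_paralelo_spec : Claim_equal_mapeo_con_busqueda_binaria_paralelo := by
  intro lista1 lista2 max_workers _ _
  unfold Spec_mapeo_con_busqueda_binaria_paralelo
  unfold mapeo_con_busqueda_binaria_paralelo mapeo_con_busqueda_binaria_paralelo_alt
  have hfold := foldl_set_enumerate (fun e => busqueda_binaria lista1 e 0 ((lista1.length : Int) - 1)) lista2 []
  simp only [List.length_nil, Int.natCast_zero, List.nil_append] at hfold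
  rw [hfold]
  apply List.map_congr_left
  intro x _
  rw [busqueda_eq_contiene_go lista1 x 0 ((lista1.length : Int) - 1) lista1.length (by omega)
    (by omega) (by omega)]
  unfold contiene
  congr 1
  have h1 : ((lista1.length : Int) - 1 + 1 - 0).toNat = lista1.length := by omega
  have h2 : (0 : Int).toNat = 0 := rfl
  rw [h1, h2, List.drop_zero, List.take_length]
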